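-- pv_equiv track=rewrite | github.com/LINGuistLIU/Sigmorphon2016_SharedTask | crfinflect.py | singleinput
-- ===== SOURCE A (Python) =====
-- def singleinput(s, t):
--     """Convert aligned sequence so that input can be processed symbol by symbol (no zeroes on input)
--     >>> singleinput('   word    ','prewordpost')
--     ([u'<', u' ', u' ', u' ', u'w', u'o', u'r', u'd', u' ', u' ', u' ', u' ', u'>'],
--      [u'<', u'p', u'r', u'e', u'w', u'o', u'r', u'd', u'p', u'o', u's', u't', u'>'])
--     """
--     s = u'<' + s + u'>'
--     t = u'<' + t + u'>'
--     sout = []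
--     tout = []
--     idx = 0
--     while idx < len(s):
--         if idx == 0 and s[idx+1] == u'_':
--             idxs = idx + 1
--             while s[idxs] == u'_':
--                 idxs += 1
--             sout.append(s[idx:idxs].replace(u'_',u''))
--             tout.append(t[idx:idxs].replace(u'_',u''))
--             idx = idxs
--         elif s[idx] != u'_':
--             sout.append(s[idx])
--             tout.append(t[idx])
--             idx += 1
--         else:
--             idxs = idx + 1
--             while s[idxs] == u'_':
--                 idxs += 1
--             sout.append(s[idx:idxs+1].replace(u'_',u''))
--             tout.append(t[idx:idxs+1].replace(u'_',u''))
--             idx = idxs + 1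
--     return ((sout, tout))
-- ===== SOURCE B (Python) =====
-- def singleinput(s, t):
--     """Same realignment as A, but by a different decomposition: precompute the
--     list of non-underscore positions of the wrapped s, then emit one group per
--     consecutive pair of those positions (a single symbol when adjacent, an
--     underscore-stripped slice otherwise); the leading underscore run attaches
--     to '<' as its own group."""
--     ws = '<' + s + '>'
--     wt = '<' + t + '>'
--     nz = [p for p in range(len(ws)) if ws[p] != '_']
--     if nz[1] > 1:  # leading underscore run attaches to '<'
--         sout = ['<', ws[nz[1]]]
--         tout = [wt[0:nz[1]].replace('_', ''), wt[nz[1]]]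
--         start = 2
--     else:
--         sout = ['<']
--         tout = [wt[0]]
--         start = 1
--     for prev, p in zip(nz[start - 1:], nz[start:]):
--         if p == prev + 1:
--             sout.append(ws[p])
--             tout.append(wt[p])
--         else:
--             sout.append(ws[prev + 1:p + 1].replace('_', ''))
--             tout.append(wt[prev + 1:p + 1].replace('_', ''))
--     return ((sout, tout))
-- ===== Notes on version B (the rewrite author's own statement) =====
-- stated objective: alternative
-- what changed: B replaces A's index-jumping while-loop with nested underscore-run scans by precomputing the list of non-underscore positions of the wrapped input and emitting one group per consecutive pair of those positions (single symbol when adjacent, underscore-stripped slice otherwise), with the leading run handled once up front.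
import Mathlib
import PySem

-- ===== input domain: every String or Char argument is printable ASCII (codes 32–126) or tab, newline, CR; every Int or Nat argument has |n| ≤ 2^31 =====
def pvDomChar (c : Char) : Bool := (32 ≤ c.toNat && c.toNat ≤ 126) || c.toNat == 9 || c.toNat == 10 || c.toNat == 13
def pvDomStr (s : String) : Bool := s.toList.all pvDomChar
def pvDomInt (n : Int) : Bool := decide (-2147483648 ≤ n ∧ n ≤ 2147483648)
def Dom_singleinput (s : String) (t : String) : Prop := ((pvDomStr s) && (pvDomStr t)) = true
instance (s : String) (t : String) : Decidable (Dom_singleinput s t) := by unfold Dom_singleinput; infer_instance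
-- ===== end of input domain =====

-- B re-decomposes A's scan: it precomputes the non-underscore positions of the wrapped
-- input and emits one group per consecutive pair of them (objective: alternative
-- algorithm, same cost). Equivalence is claimed on Pre_, exactly the inputs where
-- the Python A returns (elsewhere A raises IndexError indexing the shorter t).

-- ===== PORT A =====

-- x[a:b].replace('_','') on a string, nonnegative indices (Python slices clamp)
def sliceStrip (cs : List Char) (a b : Nat) : String :=
  String.ofList (((cs.take b).drop a).filter (fun c => c ≠ '_'))

-- the inner `while s[idxs] == '_': idxs += 1` scan; for the wrapped strings A builds,
-- the scan always stops at a non-underscore before the end (last char is '>'), so the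
-- out-of-range fallback branch is unreachable on A's actual calls
def runEndA (cs : List Char) (i : Nat) : Nat :=
  if h : i < cs.length then
    if cs.getD i ' ' = '_' then runEndA cs (i + 1) else i
  else i
termination_by cs.length - i
decreasing_by exact Nat.sub_succ_lt_self _ _ h

theorem runEndA_ge (cs : List Char) (i : Nat) : i ≤ runEndA cs i := by
  unfold runEndA
  split
  · split
    · exact Nat.le_trans (Nat.le_succ i) (runEndA_ge cs (i + 1))
    · exact Nat.le_refl i
  · exact Nat.le_refl i
termination_by cs.length - i
decreasing_by exact Nat.sub_succ_lt_self _ _ (by assumption)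

-- A's outer while-loop; `none` = the IndexError Python raises at t[idx]
def loopA (cs ct : List Char) (idx : Nat) (acc : List String × List String) :
    Option (List String × List String) :=
  if h : idx < cs.length then
    if idx = 0 ∧ cs.getD 1 ' ' = '_' then
      let idxs := runEndA cs (idx + 1)
      loopA cs ct idxs (acc.1 ++ [sliceStrip cs idx idxs], acc.2 ++ [sliceStrip ct idx idxs])
    else if cs.getD idx ' ' ≠ '_' then
      match ct[idx]? with
      | some c =>
          loopA cs ct (idx + 1)
            (acc.1 ++ [String.singleton (cs.getD idx ' ')], acc.2 ++ [String.singleton c])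
      | none => none
    else
      let idxs := runEndA cs (idx + 1)
      loopA cs ct (idxs + 1)
        (acc.1 ++ [sliceStrip cs idx (idxs + 1)], acc.2 ++ [sliceStrip ct idx (idxs + 1)])
  else some acc
termination_by cs.length - idx
decreasing_by
  · exact Nat.sub_lt_sub_left h
      (Nat.lt_of_lt_of_le (Nat.lt_succ_self idx) (runEndA_ge cs (idx + 1)))
  · exact Nat.sub_succ_lt_self _ _ h
  · exact Nat.sub_lt_sub_left h
      (Nat.lt_succ_of_lt (Nat.lt_of_lt_of_le (Nat.lt_succ_self idx) (runEndA_ge cs (idx + 1))))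

def singleinput (s : String) (t : String) : List String × List String :=
  (loopA ('<' :: s.toList ++ ['>']) ('<' :: t.toList ++ ['>']) 0 ([], [])).getD ([], [])

-- ===== PORT B =====

-- [p for p in range(len(ws)) if ws[p] != '_']
def nzList (cs : List Char) : List Nat :=
  (List.range cs.length).filter (fun p => cs.getD p ' ' ≠ '_')

-- loop body over a consecutive pair (prev, p) of non-underscore positions
def emitB (cs ct : List Char) (acc : List String × List String) (pr : Nat × Nat) :
    List String × List String :=
  if pr.2 = pr.1 + 1 then
    (acc.1 ++ [String.singleton (cs.getD pr.2 ' ')], acc.2 ++ [String.singleton (ct.getD pr.2 ' ')])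
  else
    (acc.1 ++ [sliceStrip cs (pr.1 + 1) (pr.2 + 1)], acc.2 ++ [sliceStrip ct (pr.1 + 1) (pr.2 + 1)])

-- Source B's body over the wrapped strings; all indices into wt are in range on Pre_ inputs
def altCore (ws wt : List Char) : List String × List String :=
  let nz := nzList ws
  let n1 := nz.getD 1 1
  let start := if 1 < n1 then 2 else 1
  let init : List String × List String :=
    if 1 < n1 then
      (["<", String.singleton (ws.getD n1 ' ')],
       [sliceStrip wt 0 n1, String.singleton (wt.getD n1 ' ')])
    else (["<"], [String.singleton (wt.getD 0 ' ')])
  ((nz.drop (start - 1)).zip (nz.drop start)).foldl (emitB ws wt) init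

def singleinput_alt (s : String) (t : String) : List String × List String :=
  altCore ('<' :: s.toList ++ ['>']) ('<' :: t.toList ++ ['>'])

-- ===== PRECONDITION & SPEC =====

-- Pre_ is exactly the set of inputs on which A returns: every position of the wrapped s
-- that A emits as a single symbol (a non-underscore char that is not swallowed forward
-- by a preceding underscore run, or is the char ending the leading run) is indexed in
-- the wrapped t, so it must be < |t| + 2; elsewhere A raises IndexError (and B, which
-- indexes t at the same positions, raises there too).
def Pre_singleinput (s : String) (t : String) : Prop :=
  ∀ p, p < ('<' :: s.toList ++ ['>']).length →
    ('<' :: s.toList ++ ['>']).getD p ' ' ≠ '_' →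
    (('<' :: s.toList ++ ['>']).getD (p - 1) ' ' ≠ '_' ∨
      ∀ j, j < p → 1 ≤ j → ('<' :: s.toList ++ ['>']).getD j ' ' = '_') →
    p < t.toList.length + 2

instance (s : String) (t : String) : Decidable (Pre_singleinput s t) := by
  unfold Pre_singleinput; infer_instance

def pvWitness_singleinput : String × String := ("a_b", "xyz")

def Spec_singleinput (s : String) (t : String) (out : List String × List String) : Prop :=
  out = singleinput_alt s t
instance (s : String) (t : String) (out : List String × List String) :
    Decidable (Spec_singleinput s t out) := by unfold Spec_singleinput; infer_instance

-- ===== CLAIM (what is proved, stated in full; the proofs are below) =====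
def Claim_equal_singleinput : Prop :=
  ∀ (s : String) (t : String), Dom_singleinput s t → Pre_singleinput s t →
    Spec_singleinput s t (singleinput s t)

-- ===== LEMMAS AND PROOFS =====

theorem runEndA_eq (cs : List Char) (i m : Nat) (him : i ≤ m) (hm : m < cs.length)
    (hgap : ∀ j, i ≤ j → j < m → cs.getD j ' ' = '_') (hne : cs.getD m ' ' ≠ '_') :
    runEndA cs i = m := by
  unfold runEndA
  rcases Nat.lt_or_ge i m with hlt | hge
  · have hi : i < cs.length := lt_trans hlt hm
    rw [dif_pos hi, if_pos (hgap i le_rfl hlt)]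
    exact runEndA_eq cs (i + 1) m hlt hm (fun j hj hj2 => hgap j (by omega) hj2) hne
  · have him' : i = m := le_antisymm him hge
    subst him'
    rw [dif_pos hm, if_neg hne]
termination_by m - i

theorem mem_nzList (cs : List Char) (p : Nat) :
    p ∈ nzList cs ↔ p < cs.length ∧ cs.getD p ' ' ≠ '_' := by
  simp [nzList, List.mem_filter, List.mem_range]

theorem pairwise_nzList (cs : List Char) : (nzList cs).Pairwise (· < ·) := by
  exact (List.pairwise_lt_range).filter _

-- the main loop correspondence: A's loop entered at prev+1 equals B's fold over the
-- consecutive pairs of the remaining non-underscore positions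
theorem loopA_eq_fold (ws wt : List Char)
    (HT : ∀ p, p < ws.length → ws.getD p ' ' ≠ '_' →
      (ws.getD (p - 1) ' ' ≠ '_' ∨ ∀ j, j < p → 1 ≤ j → ws.getD j ' ' = '_') →
      p < wt.length) :
    ∀ (l : List Nat) (prev : Nat) (acc : List String × List String),
      ws.getD prev ' ' ≠ '_' → prev < ws.length →
      ws.getD (ws.length - 1) ' ' ≠ '_' →
      (∀ q ∈ l, prev < q ∧ q < ws.length ∧ ws.getD q ' ' ≠ '_') →
      l.Pairwise (· < ·) →
      (∀ j, prev < j → j < ws.length → ws.getD j ' ' ≠ '_' → j ∈ l) →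
      loopA ws wt (prev + 1) acc = some (((prev :: l).zip l).foldl (emitB ws wt) acc)
  | [], prev, acc, hprev, hprevlt, hlast, _hall, _hpw, hcompl => by
      have hprevtop : prev = ws.length - 1 := by
        by_contra hne
        have h1 : prev < ws.length - 1 := by omega
        exact absurd (hcompl (ws.length - 1) h1 (by omega) hlast) (List.not_mem_nil)
      rw [loopA]
      rw [dif_neg (by omega)]
      simp
  | p :: rest, prev, acc, hprev, hprevlt, hlast, hall, hpw, hcompl => by
      obtain ⟨hpp, hplt, hpne⟩ := hall p (List.mem_cons_self)
      have hrest_gt : ∀ q ∈ rest, p < q := by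
        intro q hq
        exact (List.pairwise_cons.mp hpw).1 q hq
      have hgap : ∀ j, prev < j → j < p → ws.getD j ' ' = '_' := by
        intro j h1 h2
        by_contra hne
        have hj := hcompl j h1 (by omega) hne
        rcases List.mem_cons.mp hj with h | h
        · omega
        · have := hrest_gt j h; omega
      have hrest_all : ∀ q ∈ rest, p < q ∧ q < ws.length ∧ ws.getD q ' ' ≠ '_' := by
        intro q hq
        exact ⟨hrest_gt q hq, (hall q (List.mem_cons_of_mem _ hq)).2⟩
      have hrest_compl : ∀ j, p < j → j < ws.length → ws.getD j ' ' ≠ '_' → j ∈ rest := by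
        intro j h1 h2 h3
        rcases List.mem_cons.mp (hcompl j (by omega) h2 h3) with h | h
        · omega
        · exact h
      have hrest_pw : rest.Pairwise (· < ·) := (List.pairwise_cons.mp hpw).2
      rw [loopA, dif_pos (by omega : prev + 1 < ws.length)]
      rw [if_neg (by omega : ¬ (prev + 1 = 0 ∧ ws.getD 1 ' ' = '_'))]
      rw [List.zip_cons_cons, List.foldl_cons]
      by_cases hadj : p = prev + 1
      · -- adjacent: single-symbol branch, t is indexed at p
        subst hadj
        rw [if_pos hpne]
        have hplt' : prev + 1 < wt.length := by
          apply HT (prev + 1) hplt hpne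
          left
          simpa using hprev
        have hget : wt[prev + 1]? = some (wt.getD (prev + 1) ' ') := by
          rw [List.getD_eq_getElem _ _ hplt']
          exact List.getElem?_eq_getElem hplt'
        rw [hget]
        dsimp only
        rw [loopA_eq_fold ws wt HT rest (prev + 1) _ hpne hplt hlast hrest_all hrest_pw
          hrest_compl]
        simp [emitB]
      · -- a run of underscores precedes p: slice branch
        have hlt : prev + 1 < p := by omega
        rw [if_neg (by simpa using hgap (prev + 1) (by omega) hlt)]
        have hrun : runEndA ws (prev + 1 + 1) = p :=
          runEndA_eq ws (prev + 2) p (by omega) hplt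
            (fun j h1 h2 => hgap j (by omega) h2) hpne
        rw [hrun]
        rw [loopA_eq_fold ws wt HT rest p _ hpne hplt hlast hrest_all hrest_pw hrest_compl]
        simp [emitB, if_neg hadj]
  termination_by l => l.length

-- characters strictly inside the leading run are underscores, so the wrapped-s slice
-- s[0:n1].replace('_','') is just "<"
theorem sliceStrip_lead (ws : List Char) (n1 : Nat) (h0 : ws.getD 0 ' ' = '<')
    (hn1 : 1 ≤ n1) (hlt : n1 ≤ ws.length)
    (hgap : ∀ j, 1 ≤ j → j < n1 → ws.getD j ' ' = '_') :
    sliceStrip ws 0 n1 = "<" := by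
  rcases ws with _ | ⟨c, tl⟩
  · simp at hlt; omega
  · have hc : c = '<' := h0
    subst hc
    obtain ⟨k, hk⟩ : ∃ k, n1 = k + 1 := ⟨n1 - 1, by omega⟩
    subst hk
    unfold sliceStrip
    rw [List.drop_zero, List.take_succ_cons]
    have hfilter : (tl.take k).filter (fun c => c ≠ '_') = [] := by
      rw [List.filter_eq_nil_iff]
      intro a ha
      rw [List.mem_iff_getElem] at ha
      obtain ⟨i, hi, hai⟩ := ha
      rw [List.getElem_take] at hai
      have hilen : i < tl.length := by
        have := List.length_take_le k tl
        rw [List.length_take] at hi; omega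
      have hikn : i + 1 < k + 1 := by rw [List.length_take] at hi; omega
      have := hgap (i + 1) (by omega) hikn
      rw [List.getD_cons_succ, List.getD_eq_getElem _ _ hilen] at this
      simp [← hai, this]
    simp only [List.filter_cons, hfilter]
    decide

-- structure of nzList on a wrapped string: it starts with 0 and its second element n1
-- is the least non-underscore position ≥ 1
theorem nzList_cons (ws : List Char) (h0 : ws.getD 0 ' ' = '<') (hlen : 2 ≤ ws.length) :
    nzList ws = 0 :: (nzList ws).tail := by
  have h0m : (0 : Nat) ∈ nzList ws := by
    rw [mem_nzList]
    refine ⟨by omega, ?_⟩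
    rw [h0]; decide
  have hpw := pairwise_nzList ws
  cases hl : nzList ws with
  | nil => rw [hl] at h0m; exact absurd h0m (List.not_mem_nil)
  | cons a l =>
    rw [hl] at h0m hpw
    have ha : a = 0 := by
      rcases List.mem_cons.mp h0m with h | h
      · omega
      · have := (List.pairwise_cons.mp hpw).1 0 h
        omega
    rw [ha]
    rfl

-- the top-level correspondence over the wrapped strings
theorem altCore_eq (ws wt : List Char) (h0 : ws.getD 0 ' ' = '<') (hw0 : 0 < wt.length)
    (hlen : 2 ≤ ws.length) (hlast : ws.getD (ws.length - 1) ' ' ≠ '_')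
    (HT : ∀ p, p < ws.length → ws.getD p ' ' ≠ '_' →
      (ws.getD (p - 1) ' ' ≠ '_' ∨ ∀ j, j < p → 1 ≤ j → ws.getD j ' ' = '_') →
      p < wt.length) :
    loopA ws wt 0 ([], []) = some (altCore ws wt) := by
  have h0ne : ws.getD 0 ' ' ≠ '_' := by rw [h0]; decide
  -- decompose nzList ws = 0 :: n1 :: rest
  have hz := nzList_cons ws h0 hlen
  have htailne : (nzList ws).tail ≠ [] := by
    intro h
    have hm : ws.length - 1 ∈ nzList ws := by
      rw [mem_nzList]; exact ⟨by omega, hlast⟩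
    rw [hz, h] at hm
    rcases List.mem_cons.mp hm with hcon | hcon
    · omega
    · exact List.not_mem_nil hcon
  rcases hl : (nzList ws).tail with _ | ⟨n1, rest⟩
  · exact absurd hl htailne
  have hzfull : nzList ws = 0 :: n1 :: rest := by rw [hz, hl]
  have hpw := pairwise_nzList ws
  rw [hzfull] at hpw
  have hn1mem : n1 ∈ nzList ws := by rw [hzfull]; simp
  obtain ⟨hn1lt, hn1ne⟩ := (mem_nzList ws n1).mp hn1mem
  have hn1pos : 1 ≤ n1 := by
    have := (List.pairwise_cons.mp hpw).1 n1 (by simp)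
    omega
  have hrest_gt : ∀ q ∈ rest, n1 < q :=
    fun q hq => (List.pairwise_cons.mp (List.pairwise_cons.mp hpw).2).1 q hq
  have hcompl : ∀ j, 0 < j → j < ws.length → ws.getD j ' ' ≠ '_' → j ∈ n1 :: rest := by
    intro j h1 h2 h3
    have : j ∈ nzList ws := (mem_nzList ws j).mpr ⟨h2, h3⟩
    rw [hzfull] at this
    rcases List.mem_cons.mp this with h | h
    · omega
    · exact h
  have hgap : ∀ j, 1 ≤ j → j < n1 → ws.getD j ' ' = '_' := by
    intro j h1 h2
    by_contra hne
    rcases List.mem_cons.mp (hcompl j (by omega) (by omega) hne) with h | h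
    · omega
    · have := hrest_gt j h; omega
  have hrest_all : ∀ q ∈ rest, n1 < q ∧ q < ws.length ∧ ws.getD q ' ' ≠ '_' := by
    intro q hq
    obtain ⟨h2, h3⟩ := (mem_nzList ws q).mp (by rw [hzfull]; simp [hq])
    exact ⟨hrest_gt q hq, h2, h3⟩
  have hrest_pw : rest.Pairwise (· < ·) := (List.pairwise_cons.mp (List.pairwise_cons.mp hpw).2).2
  have hrest_compl : ∀ j, n1 < j → j < ws.length → ws.getD j ' ' ≠ '_' → j ∈ rest := by
    intro j h1 h2 h3
    rcases List.mem_cons.mp (hcompl j (by omega) h2 h3) with h | h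
    · omega
    · exact h
  -- unfold B's body
  unfold altCore
  rw [hzfull]
  simp only [List.getD_cons_succ, List.getD_cons_zero]
  by_cases hlead : 1 < n1
  · -- leading underscore run
    have hws1 : ws.getD 1 ' ' = '_' := hgap 1 le_rfl hlead
    rw [if_pos hlead, if_pos hlead]
    -- A's first iteration: leading branch
    rw [loopA, dif_pos (by omega : 0 < ws.length), if_pos ⟨rfl, hws1⟩]
    have hrun : runEndA ws (0 + 1) = n1 :=
      runEndA_eq ws 1 n1 hn1pos hn1lt (fun j hj1 hj2 => hgap j hj1 hj2) hn1ne
    rw [hrun]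
    -- A's second step at idx = n1: single symbol (n1 ≥ 1 so idx ≠ 0)
    have hn1wt : n1 < wt.length := by
      apply HT n1 hn1lt hn1ne
      right
      intro j hj1 hj2
      exact hgap j hj2 hj1
    rw [loopA, dif_pos (by omega : n1 < ws.length),
      if_neg (fun h => absurd h.1 (by omega)), if_pos hn1ne]
    have hget : wt[n1]? = some (wt.getD n1 ' ') := by
      rw [List.getD_eq_getElem _ _ hn1wt]
      exact List.getElem?_eq_getElem hn1wt
    rw [hget]
    dsimp only
    rw [loopA_eq_fold ws wt HT rest n1 _ hn1ne hn1lt hlast hrest_all hrest_pw hrest_compl]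
    simp only [show (2 : Nat) - 1 = 1 from rfl, List.drop_succ_cons, List.drop_zero]
    congr 2
    simp [sliceStrip_lead ws n1 h0 (by omega) (by omega) hgap]
  · -- no leading run: n1 = 1
    have hn1one : n1 = 1 := by omega
    subst hn1one
    rw [if_neg hlead, if_neg hlead]
    rw [loopA, dif_pos (by omega : 0 < ws.length)]
    rw [if_neg (fun h => hn1ne h.2), if_pos h0ne]
    have hget : wt[0]? = some (wt.getD 0 ' ') := by
      rw [List.getD_eq_getElem _ _ hw0]
      exact List.getElem?_eq_getElem hw0
    rw [hget]
    dsimp only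
    rw [loopA_eq_fold ws wt HT (1 :: rest) 0 _ h0ne (by omega) hlast
      (by
        intro q hq
        rcases List.mem_cons.mp hq with h | h
        · subst h; exact ⟨by omega, hn1lt, hn1ne⟩
        · obtain ⟨h1, h2, h3⟩ := hrest_all q h
          exact ⟨by omega, h2, h3⟩)
      (by
        rw [List.pairwise_cons]
        exact ⟨fun q hq => hrest_gt q hq, hrest_pw⟩)
      (by
        intro j h1 h2 h3
        exact hcompl j h1 h2 h3)]
    simp only [show (1 : Nat) - 1 = 0 from rfl, List.drop_zero, List.drop_one, List.tail_cons]
    congr 2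
    rw [h0]
    rfl

theorem wrapped_getD_zero (s : String) : ('<' :: s.toList ++ ['>']).getD 0 ' ' = '<' := rfl

theorem wrapped_length (s : String) :
    ('<' :: s.toList ++ ['>']).length = s.toList.length + 2 := by simp

theorem wrapped_getD_last (s : String) :
    ('<' :: s.toList ++ ['>']).getD (('<' :: s.toList ++ ['>']).length - 1) ' ' = '>' := by
  rw [wrapped_length]
  have h : ('<' :: s.toList ++ ['>']) = ('<' :: s.toList) ++ ['>'] := by simp
  rw [h]
  have hlen : s.toList.length + 2 - 1 = ('<' :: s.toList).length := by simp
  rw [hlen]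
  rw [List.getD_eq_getElem _ _ (by simp)]
  simp

-- ===== VERDICT (by name: the statement is the Claim_ definition above) =====
theorem singleinput_spec : Claim_equal_singleinput := by
  intro s t _hdom hpre
  unfold Spec_singleinput singleinput singleinput_alt
  have hcore := altCore_eq ('<' :: s.toList ++ ['>']) ('<' :: t.toList ++ ['>'])
    (wrapped_getD_zero s) (by simp) (by rw [wrapped_length]; omega)
    (by rw [wrapped_getD_last]; decide)
    (by
      intro p hp hne hsc
      have := hpre p hp hne hsc
      have hlen : ('<' :: t.toList ++ ['>']).length = t.toList.length + 2 := wrapped_length t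
      omega)
  rw [hcore]
  rfl
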